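-- pv_equiv track=rewrite | github.com/sokcho-kim/codingtest.py | 프로그래머스/1/12934. 정수 제곱근 판별/정수 제곱근 판별.py | solution
-- ===== SOURCE A (Python) =====
-- def solution(n):
--     answer = 0
--     low = 0
--     high = n
--     x = 0
--     while low <= high :
--         mid = (low + high)//2
--         mid_sqrd = mid * mid
--         if mid_sqrd == n:
--              x = mid
--              break
--         elif mid_sqrd < n:
--             result = mid
--             low = mid + 1
--         else:
--             high = mid - 1
--     if (x <= 0): answer = -1
--     else : answer = (x+1)**2
--
--     return answer
-- ===== SOURCE B (Python) =====
-- import math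
--
-- def solution(n):
--     if n <= 0:
--         return -1
--     r = math.isqrt(n)
--     return (r + 1) ** 2 if r * r == n else -1
-- ===== Notes on version B (the rewrite author's own statement) =====
-- stated objective: idiomatic
-- what changed: Replaces the hand-written binary-search loop with a direct closed-form test via math.isqrt, returning -1 for n <= 0 (where A's loop also yields -1).
import Mathlib
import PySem

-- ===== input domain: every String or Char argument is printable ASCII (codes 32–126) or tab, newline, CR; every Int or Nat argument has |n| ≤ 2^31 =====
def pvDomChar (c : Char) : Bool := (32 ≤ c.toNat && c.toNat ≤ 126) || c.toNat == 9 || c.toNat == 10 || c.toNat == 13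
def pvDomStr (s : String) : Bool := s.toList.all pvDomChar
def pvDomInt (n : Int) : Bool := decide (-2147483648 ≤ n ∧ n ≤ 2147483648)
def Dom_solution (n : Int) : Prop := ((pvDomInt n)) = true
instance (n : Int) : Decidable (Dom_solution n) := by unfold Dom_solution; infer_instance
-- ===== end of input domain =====

-- B replaces A's binary-search loop by a closed-form test with math.isqrt (Nat.sqrt);
-- same return value everywhere, including n ≤ 0 → -1.

-- ===== PORT A =====
-- the while loop of A: returns the final value of x (0 unless a break sets it)
def solutionLoop (n low high : Int) : Int :=
  if _h : low ≤ high then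
    let mid := PySem.Int.floordiv (low + high) 2
    if mid * mid = n then mid
    else if mid * mid < n then solutionLoop n (mid + 1) high
    else solutionLoop n low (mid - 1)
  else 0
termination_by (high + 1 - low).toNat
decreasing_by
  · have := PySem.Int.floordiv_two_mid_bounds _h
    omega
  · have := PySem.Int.floordiv_two_mid_bounds _h
    omega

def solution (n : Int) : Int :=
  let x := solutionLoop n 0 n
  if x ≤ 0 then -1 else (x + 1) ^ 2

-- ===== PORT B =====
def solution_alt (n : Int) : Int :=
  if n ≤ 0 then -1
  else
    let r : Int := (Nat.sqrt n.toNat : Int)   -- math.isqrt(n)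
    if r * r = n then (r + 1) ^ 2 else -1

-- ===== PRECONDITION & SPEC =====
def Spec_solution (n : Int) (out : Int) : Prop := out = solution_alt n
instance (n : Int) (out : Int) : Decidable (Spec_solution n out) := by unfold Spec_solution; infer_instance

-- ===== CLAIM (what is proved, stated in full; the proofs are below) =====
def Claim_equal_solution : Prop := ∀ (n : Int), Dom_solution n → Spec_solution n (solution n)

-- ===== LEMMAS AND PROOFS =====

-- if a nonnegative root r of n lies in [low, high] (with 0 ≤ low), the loop finds it
theorem solutionLoop_finds (n low high r : Int) (h0 : 0 ≤ low) (hr : 0 ≤ r)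
    (hlr : low ≤ r) (hrh : r ≤ high) (hsq : r * r = n) :
    solutionLoop n low high = r := by
  induction low, high using solutionLoop.induct n with
  | case1 low high h mid h1 =>
    rw [solutionLoop, dif_pos h, if_pos (by simp only [mid] at h1 ⊢; exact h1)]
    have hb := PySem.Int.floordiv_two_mid_bounds h
    simp only [mid] at h1 ⊢
    nlinarith [hb.1, hb.2]
  | case2 low high h mid h1 h2 ih =>
    have hb := PySem.Int.floordiv_two_mid_bounds h
    rw [solutionLoop, dif_pos h]
    simp only [mid] at h1 h2 ih ⊢
    rw [if_neg h1, if_pos h2]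
    have hmr : PySem.Int.floordiv (low + high) 2 < r := by
      by_contra hc
      have hc' : r ≤ PySem.Int.floordiv (low + high) 2 := by omega
      have := mul_le_mul_of_nonneg hc' hc' hr (by omega)
      omega
    exact ih (by omega) (by omega) hrh
  | case3 low high h mid h1 h2 ih =>
    have hb := PySem.Int.floordiv_two_mid_bounds h
    rw [solutionLoop, dif_pos h]
    simp only [mid] at h1 h2 ih ⊢
    rw [if_neg h1, if_neg h2]
    have hrm : r < PySem.Int.floordiv (low + high) 2 := by
      by_contra hc
      have hc' : PySem.Int.floordiv (low + high) 2 ≤ r := by omega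
      have := mul_le_mul_of_nonneg hc' hc' (by omega) hr
      omega
    exact ih h0 hlr (by omega)
  | case4 low high h =>
    omega

-- if no element of [low, high] squares to n, the loop ends with x = 0
theorem solutionLoop_none (n low high : Int)
    (h : ∀ m, low ≤ m → m ≤ high → m * m ≠ n) :
    solutionLoop n low high = 0 := by
  induction low, high using solutionLoop.induct n with
  | case1 low high hle mid h1 =>
    have hb := PySem.Int.floordiv_two_mid_bounds hle
    exact absurd h1 (h _ hb.1 hb.2)
  | case2 low high hle mid h1 h2 ih =>
    have hb := PySem.Int.floordiv_two_mid_bounds hle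
    rw [solutionLoop, dif_pos hle]
    simp only [mid] at h1 h2 ih ⊢
    rw [if_neg h1, if_pos h2]
    exact ih fun m hm1 hm2 => h m (by omega) hm2
  | case3 low high hle mid h1 h2 ih =>
    have hb := PySem.Int.floordiv_two_mid_bounds hle
    rw [solutionLoop, dif_pos hle]
    simp only [mid] at h1 h2 ih ⊢
    rw [if_neg h1, if_neg h2]
    exact ih fun m hm1 hm2 => h m hm1 (by omega)
  | case4 low high hle =>
    rw [solutionLoop, dif_neg hle]

-- ===== VERDICT (by name: the statement is the Claim_ definition above) =====
theorem solution_spec : Claim_equal_solution := by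
  intro n _
  unfold Spec_solution solution solution_alt
  by_cases hn : n ≤ 0
  · rw [if_pos hn]
    have hx : solutionLoop n 0 n = 0 := by
      rcases eq_or_lt_of_le hn with h0 | h0
      · exact solutionLoop_finds n 0 n 0 le_rfl le_rfl le_rfl (by omega) (by omega)
      · rw [solutionLoop, dif_neg (by omega)]
    simp [hx]
  · rw [if_neg hn]
    push Not at hn
    set r : Int := (Nat.sqrt n.toNat : Int) with hrdef
    have hr0 : 0 ≤ r := by positivity
    have hle : r * r ≤ n := by
      have h : Nat.sqrt n.toNat * Nat.sqrt n.toNat ≤ n.toNat := by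
        simpa [pow_two] using Nat.sqrt_le' n.toNat
      zify at h
      rwa [Int.toNat_of_nonneg hn.le] at h
    have hlt : n < (r + 1) * (r + 1) := by
      have h : n.toNat < (Nat.sqrt n.toNat + 1) * (Nat.sqrt n.toNat + 1) := by
        simpa [pow_two, Nat.succ_eq_add_one] using Nat.lt_succ_sqrt' n.toNat
      zify at h
      rw [Int.toNat_of_nonneg hn.le] at h
      simpa [hrdef] using h
    by_cases hsq : r * r = n
    · rw [if_pos hsq]
      have hr1 : 1 ≤ r := by nlinarith
      have hx : solutionLoop n 0 n = r :=
        solutionLoop_finds n 0 n r le_rfl hr0 hr0 (by nlinarith) hsq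
      rw [hx, if_neg (by omega)]
    · rw [if_neg hsq]
      have hx : solutionLoop n 0 n = 0 := by
        apply solutionLoop_none
        intro m h1 h2 hm
        apply hsq
        have hmn : ((m.toNat * m.toNat : Nat) : Int) = ((n.toNat : Nat) : Int) := by
          push_cast
          rw [Int.toNat_of_nonneg h1, Int.toNat_of_nonneg hn.le]
          exact hm
        have key : Nat.sqrt n.toNat = m.toNat := by
          have hs := Nat.sqrt_eq' m.toNat
          rw [pow_two] at hs
          rw [← hs]
          congr 1
          exact_mod_cast hmn.symm
        have hr : r = m := by
          rw [hrdef, key]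
          exact Int.toNat_of_nonneg h1
        rw [hr]; exact hm
      rw [hx, if_pos le_rfl]
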